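-- pv_equiv track=rewrite | github.com/KatieFournier1/cs162 | w10/cargo1.py | load_trucks
-- ===== SOURCE A (Python) =====
-- from copy import copy
--
-- def load_trucks(cargo, truck1, truck2, truck1_max, truck2_max):
--     if len(cargo) == 0:
--         # There's nothing left to load.
--         return (truck1, truck2)
--     for i in range(len(cargo)):
--         crate = cargo[i]
--         for truck, truck_max in zip([truck1, truck2], [truck1_max, truck2_max]):
--             if crate + sum(truck) <= truck_max:
--                 # We can fit this crate on this truck, so load it.
--                 truck.append(crate)
--                 updated_cargo = copy(cargo)
--                 updated_cargo.pop(i)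
--                 # Load the rest of the crates.
--                 return load_trucks(updated_cargo, copy(truck1), copy(truck2),
--                                    truck1_max, truck2_max)
--     # We weren't able to load all of the crates.
--     return (truck1, truck2)
-- ===== SOURCE B (Python) =====
-- def load_trucks(cargo, truck1, truck2, truck1_max, truck2_max):
--     t1 = list(truck1)
--     t2 = list(truck2)
--     s1 = sum(t1)
--     s2 = sum(t2)
--     rem = list(cargo)
--     while True:
--         skipped = []
--         for pos, crate in enumerate(rem):
--             if s1 + crate <= truck1_max:
--                 t1.append(crate)
--                 s1 += crate
--                 rem = skipped + rem[pos + 1:]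
--                 break
--             if s2 + crate <= truck2_max:
--                 t2.append(crate)
--                 s2 += crate
--                 rem = skipped + rem[pos + 1:]
--                 break
--             skipped.append(crate)
--         else:
--             return (t1, t2)
-- ===== Notes on version B (the rewrite author's own statement) =====
-- stated objective: faster
-- what changed: Replaced A's recursion that pops by index, copies every list and recomputes sum(truck) on each fit test with an iterative worklist loop keeping running truck sums and rebuilding the remaining cargo as skipped-prefix + tail, so each fit test is O(1) instead of O(n) and no per-step list copies are made.
import Mathlib
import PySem

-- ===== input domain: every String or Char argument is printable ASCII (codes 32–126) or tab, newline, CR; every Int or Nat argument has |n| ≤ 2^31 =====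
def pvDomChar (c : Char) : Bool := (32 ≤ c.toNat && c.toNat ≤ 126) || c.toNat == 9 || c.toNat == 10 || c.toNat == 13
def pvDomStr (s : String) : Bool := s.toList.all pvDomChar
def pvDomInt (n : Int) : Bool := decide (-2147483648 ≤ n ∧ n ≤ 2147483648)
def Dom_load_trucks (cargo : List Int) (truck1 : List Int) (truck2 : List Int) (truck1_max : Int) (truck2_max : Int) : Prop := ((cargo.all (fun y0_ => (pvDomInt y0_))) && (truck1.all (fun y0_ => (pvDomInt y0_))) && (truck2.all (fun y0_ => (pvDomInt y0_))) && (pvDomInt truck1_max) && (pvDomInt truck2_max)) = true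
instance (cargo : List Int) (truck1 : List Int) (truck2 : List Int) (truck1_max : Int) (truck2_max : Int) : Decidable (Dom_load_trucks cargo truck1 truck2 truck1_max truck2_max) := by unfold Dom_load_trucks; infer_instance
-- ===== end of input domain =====

-- B replaces A's recursion (index pop, full list copies, sum(truck) recomputed on every fit
-- test) with an iterative worklist loop keeping running truck sums. Note: Python A mutates its
-- truck arguments in place; the equivalence proved here is about the return value only (B does
-- not mutate its arguments).

-- ===== PORT A =====
-- the 'for i in range(len(cargo))' loop of A: returns the first index whose crate fits a truck,
-- together with the crate and which truck (true = truck1), or none if the loop falls through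
def pyScanA (cargo truck1 truck2 : List Int) (truck1_max truck2_max : Int) (i : Nat) :
    Option (Nat × Int × Bool) :=
  if h : i < cargo.length then
    -- crate := cargo[i]
    if cargo.getD i 0 + truck1.sum ≤ truck1_max then some (i, cargo.getD i 0, true)
    else if cargo.getD i 0 + truck2.sum ≤ truck2_max then some (i, cargo.getD i 0, false)
    else pyScanA cargo truck1 truck2 truck1_max truck2_max (i + 1)
  else none
termination_by cargo.length - i

-- termination fact the port's recursion needs: the index A pops is in range
theorem pyScanA_lt (cargo truck1 truck2 : List Int) (truck1_max truck2_max : Int) (i : Nat)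
    (k : Nat) (c : Int) (b : Bool)
    (h : pyScanA cargo truck1 truck2 truck1_max truck2_max i = some (k, c, b)) :
    k < cargo.length := by
  induction i using pyScanA.induct cargo truck1 truck2 truck1_max truck2_max with
  | case1 i hi hfit =>
    rw [pyScanA, dif_pos hi, if_pos hfit] at h
    simp only [Option.some.injEq, Prod.mk.injEq] at h
    obtain ⟨rfl, -, -⟩ := h; exact hi
  | case2 i hi hfit1 hfit2 =>
    rw [pyScanA, dif_pos hi, if_neg hfit1, if_pos hfit2] at h
    simp only [Option.some.injEq, Prod.mk.injEq] at h
    obtain ⟨rfl, -, -⟩ := h; exact hi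
  | case3 i hi hfit1 hfit2 ih =>
    rw [pyScanA, dif_pos hi, if_neg hfit1, if_neg hfit2] at h; exact ih h
  | case4 i hi => rw [pyScanA, dif_neg hi] at h; exact absurd h (by simp)

def load_trucks (cargo : List Int) (truck1 : List Int) (truck2 : List Int)
    (truck1_max : Int) (truck2_max : Int) : List Int × List Int :=
  if cargo.length = 0 then (truck1, truck2)
  else
    match h : pyScanA cargo truck1 truck2 truck1_max truck2_max 0 with
    | some (i, crate, b) =>
      -- load the crate, pop it from a copy of cargo, recurse on the rest
      if b then
        load_trucks (cargo.eraseIdx i) (truck1 ++ [crate]) truck2 truck1_max truck2_max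
      else
        load_trucks (cargo.eraseIdx i) truck1 (truck2 ++ [crate]) truck1_max truck2_max
    | none => (truck1, truck2)
termination_by cargo.length
decreasing_by
  · have hil := pyScanA_lt cargo truck1 truck2 truck1_max truck2_max 0 i crate b h
    rw [List.length_eraseIdx, if_pos hil]; omega
  · have hil := pyScanA_lt cargo truck1 truck2 truck1_max truck2_max 0 i crate b h
    rw [List.length_eraseIdx, if_pos hil]; omega

-- ===== PORT B =====
-- B's inner for-loop: walk the remaining cargo accumulating the skipped prefix; on the first
-- crate that fits, return the updated trucks, running sums and new remaining list (skipped +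
-- tail); none = the for-loop fell through to its else (no crate fits)
def scanPlace (m1 m2 : Int) (skipped rem t1 : List Int) (s1 : Int) (t2 : List Int) (s2 : Int) :
    Option (List Int × Int × List Int × Int × List Int) :=
  match rem with
  | [] => none
  | crate :: rest =>
    if s1 + crate ≤ m1 then some (t1 ++ [crate], s1 + crate, t2, s2, skipped ++ rest)
    else if s2 + crate ≤ m2 then some (t1, s1, t2 ++ [crate], s2 + crate, skipped ++ rest)
    else scanPlace m1 m2 (skipped ++ [crate]) rest t1 s1 t2 s2

-- termination fact B's while-loop needs: a placement shrinks the remaining cargo by one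
theorem scanPlace_length (m1 m2 : Int) (skipped rem t1 : List Int) (s1 : Int) (t2 : List Int)
    (s2 : Int) (t1' : List Int) (s1' : Int) (t2' : List Int) (s2' : Int) (rem' : List Int)
    (h : scanPlace m1 m2 skipped rem t1 s1 t2 s2 = some (t1', s1', t2', s2', rem')) :
    rem'.length + 1 = skipped.length + rem.length := by
  induction rem generalizing skipped with
  | nil => exact absurd h (by simp [scanPlace])
  | cons crate rest ih =>
    rw [scanPlace] at h
    by_cases h1 : s1 + crate ≤ m1
    · rw [if_pos h1] at h
      simp only [Option.some.injEq, Prod.mk.injEq] at h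
      obtain ⟨-, -, -, -, rfl⟩ := h
      simp; omega
    · rw [if_neg h1] at h
      by_cases h2 : s2 + crate ≤ m2
      · rw [if_pos h2] at h
        simp only [Option.some.injEq, Prod.mk.injEq] at h
        obtain ⟨-, -, -, -, rfl⟩ := h
        simp; omega
      · rw [if_neg h2] at h
        have := ih (skipped ++ [crate]) h
        simp at this ⊢
        omega

-- B's while-loop
def loopB (m1 m2 : Int) (rem t1 : List Int) (s1 : Int) (t2 : List Int) (s2 : Int) :
    List Int × List Int :=
  match h : scanPlace m1 m2 [] rem t1 s1 t2 s2 with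
  | none => (t1, t2)
  | some (t1', s1', t2', s2', rem') => loopB m1 m2 rem' t1' s1' t2' s2'
termination_by rem.length
decreasing_by
  have := scanPlace_length m1 m2 [] rem t1 s1 t2 s2 t1' s1' t2' s2' rem' h
  simp at this; omega

def load_trucks_alt (cargo : List Int) (truck1 : List Int) (truck2 : List Int)
    (truck1_max : Int) (truck2_max : Int) : List Int × List Int :=
  loopB truck1_max truck2_max cargo truck1 truck1.sum truck2 truck2.sum

-- ===== PRECONDITION & SPEC =====
def Spec_load_trucks (cargo : List Int) (truck1 : List Int) (truck2 : List Int) (truck1_max : Int) (truck2_max : Int) (out : List Int × List Int) : Prop := out = load_trucks_alt cargo truck1 truck2 truck1_max truck2_max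
instance (cargo : List Int) (truck1 : List Int) (truck2 : List Int) (truck1_max : Int) (truck2_max : Int) (out : List Int × List Int) : Decidable (Spec_load_trucks cargo truck1 truck2 truck1_max truck2_max out) := by unfold Spec_load_trucks; infer_instance

-- ===== CLAIM (what is proved, stated in full; the proofs are below) =====
def Claim_equal_load_trucks : Prop := ∀ (cargo : List Int) (truck1 : List Int) (truck2 : List Int) (truck1_max : Int) (truck2_max : Int), Dom_load_trucks cargo truck1 truck2 truck1_max truck2_max → Spec_load_trucks cargo truck1 truck2 truck1_max truck2_max (load_trucks cargo truck1 truck2 truck1_max truck2_max)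

-- ===== LEMMAS AND PROOFS =====

-- B's inner scan, started with the first i crates already skipped, finds exactly what A's
-- index scan from i finds, with the running sums standing in for A's recomputed sums
theorem scanPlace_eq_pyScanA (cargo t1 t2 : List Int) (m1 m2 : Int) (i : Nat) :
    scanPlace m1 m2 (cargo.take i) (cargo.drop i) t1 t1.sum t2 t2.sum =
      match pyScanA cargo t1 t2 m1 m2 i with
      | none => none
      | some (k, c, true) => some (t1 ++ [c], t1.sum + c, t2, t2.sum, cargo.eraseIdx k)
      | some (k, c, false) => some (t1, t1.sum, t2 ++ [c], t2.sum + c, cargo.eraseIdx k) := by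
  induction i using pyScanA.induct cargo t1 t2 m1 m2 with
  | case1 i hi hfit =>
    rw [pyScanA, dif_pos hi, if_pos hfit]
    rw [List.drop_eq_getElem_cons hi, scanPlace]
    rw [if_pos (by rw [List.getD_eq_getElem cargo 0 hi] at hfit; omega)]
    simp [List.eraseIdx_eq_take_drop_succ, List.getElem?_eq_getElem hi]
  | case2 i hi hfit1 hfit2 =>
    rw [pyScanA, dif_pos hi, if_neg hfit1, if_pos hfit2]
    rw [List.drop_eq_getElem_cons hi, scanPlace]
    rw [if_neg (by rw [List.getD_eq_getElem cargo 0 hi] at hfit1; omega)]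
    rw [if_pos (by rw [List.getD_eq_getElem cargo 0 hi] at hfit2; omega)]
    simp [List.eraseIdx_eq_take_drop_succ, List.getElem?_eq_getElem hi]
  | case3 i hi hfit1 hfit2 ih =>
    rw [pyScanA, dif_pos hi, if_neg hfit1, if_neg hfit2]
    rw [List.drop_eq_getElem_cons hi, scanPlace]
    rw [if_neg (by rw [List.getD_eq_getElem cargo 0 hi] at hfit1; omega)]
    rw [if_neg (by rw [List.getD_eq_getElem cargo 0 hi] at hfit2; omega)]
    rw [show cargo.take i ++ [cargo[i]] = cargo.take (i + 1) by
      rw [List.take_add_one]; simp [List.getElem?_eq_getElem hi]]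
    exact ih
  | case4 i hi =>
    rw [pyScanA, dif_neg hi, List.drop_eq_nil_of_le (by omega), scanPlace]

-- the main equivalence, by strong induction on the cargo length
theorem load_eq (n : Nat) : ∀ (cargo t1 t2 : List Int) (m1 m2 : Int),
    cargo.length = n →
    load_trucks cargo t1 t2 m1 m2 = loopB m1 m2 cargo t1 t1.sum t2 t2.sum := by
  induction n using Nat.strong_induction_on with
  | _ n ih =>
    intro cargo t1 t2 m1 m2 hlen
    have hsp := scanPlace_eq_pyScanA cargo t1 t2 m1 m2 0
    simp only [List.take_zero, List.drop_zero] at hsp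
    rw [load_trucks, loopB]
    by_cases h0 : cargo.length = 0
    · have : cargo = [] := List.length_eq_zero_iff.mp h0
      subst this
      exact rfl
    · rw [if_neg h0]
      cases hscan : pyScanA cargo t1 t2 m1 m2 0 with
      | none =>
        rw [hscan] at hsp
        rw [hsp]
      | some v =>
        obtain ⟨k, c, b⟩ := v
        have hk := pyScanA_lt cargo t1 t2 m1 m2 0 k c b hscan
        have hlen' : (cargo.eraseIdx k).length < n := by
          rw [List.length_eraseIdx, if_pos hk]; omega
        rw [hscan] at hsp
        cases b with
        | true =>
          rw [hsp]
          show load_trucks (cargo.eraseIdx k) (t1 ++ [c]) t2 m1 m2 =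
            loopB m1 m2 (cargo.eraseIdx k) (t1 ++ [c]) (t1.sum + c) t2 t2.sum
          rw [ih _ hlen' _ _ _ _ _ rfl]
          simp [List.sum_append]
        | false =>
          rw [hsp]
          show load_trucks (cargo.eraseIdx k) t1 (t2 ++ [c]) m1 m2 =
            loopB m1 m2 (cargo.eraseIdx k) t1 t1.sum (t2 ++ [c]) (t2.sum + c)
          rw [ih _ hlen' _ _ _ _ _ rfl]
          simp [List.sum_append]

-- ===== VERDICT (by name: the statement is the Claim_ definition above) =====
theorem load_trucks_spec : Claim_equal_load_trucks := by
  intro cargo t1 t2 m1 m2 _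
  unfold Spec_load_trucks load_trucks_alt
  exact load_eq cargo.length cargo t1 t2 m1 m2 rfl
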